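-- pv_equiv track=rewrite | github.com/AIcarusDev/AIcarusForQQ | src/tools/send_message/send_message.py | _split_consecutive_texts
-- ===== SOURCE A (Python) =====
-- def _split_consecutive_texts(segments: list[dict]) -> list[list[dict]]:
--     """将含连续 text segments 的消息拆分为多组。
--
--     规则：每当遇到第二个连续 text，在第一个 text 之后切割。
--     例：[at, text, text] → [[at, text], [text]]
--         [text, text, text] → [[text], [text], [text]]
--     """
--     if not segments:
--         return []
--     groups: list[list[dict]] = []
--     current: list[dict] = []
--     prev_was_text = False
--     for seg in segments:
--         is_text = seg.get("command") == "text"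
--         if is_text and prev_was_text:
--             groups.append(current)
--             current = [seg]
--         else:
--             current.append(seg)
--         prev_was_text = is_text
--     if current:
--         groups.append(current)
--     return groups
-- ===== SOURCE B (Python) =====
-- def _split_consecutive_texts(segments: list[dict]) -> list[list[dict]]:
--     if not segments:
--         return []
--     n = len(segments)
--     cuts = [i for i in range(1, n)
--             if segments[i].get("command") == "text"
--             and segments[i - 1].get("command") == "text"]
--     bounds = [0] + cuts + [n]
--     return [segments[bounds[j]:bounds[j + 1]] for j in range(len(bounds) - 1)]
-- ===== Notes on version B (the rewrite author's own statement) =====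
-- stated objective: alternative
-- what changed: Replaces A's stateful accumulator loop (groups/current/prev_was_text flag with a final flush) by a two-phase index decomposition: first collect the cut positions where two consecutive segments are both text, then slice the input at those boundaries.
import Mathlib
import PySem

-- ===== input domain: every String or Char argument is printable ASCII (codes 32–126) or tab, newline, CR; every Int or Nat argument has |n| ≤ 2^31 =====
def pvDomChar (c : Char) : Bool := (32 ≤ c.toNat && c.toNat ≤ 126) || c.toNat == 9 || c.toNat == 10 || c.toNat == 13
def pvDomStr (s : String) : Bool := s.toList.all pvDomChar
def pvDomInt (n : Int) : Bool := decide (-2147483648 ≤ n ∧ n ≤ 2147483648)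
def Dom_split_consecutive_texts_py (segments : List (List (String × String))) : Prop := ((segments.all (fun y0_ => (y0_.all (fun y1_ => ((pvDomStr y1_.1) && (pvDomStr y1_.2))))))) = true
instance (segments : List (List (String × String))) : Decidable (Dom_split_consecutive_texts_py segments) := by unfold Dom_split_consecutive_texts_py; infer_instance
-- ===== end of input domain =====

-- B replaces A's accumulator/flag loop by computing the cut indices and slicing the
-- input at them (a different decomposition, same O(n) cost).

-- seg.get("command") == "text"  (shared one-line lookup helper, used by both ports)
def pvIsText (seg : List (String × String)) : Bool :=
  PySem.Dict.get? (PySem.Dict.mk seg) "command" == some "text"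

-- ===== PORT A =====
-- one loop step of A: state = (groups, current, prev_was_text)
def pvAStep (st : List (List (List (String × String))) × List (List (String × String)) × Bool)
    (seg : List (String × String)) :
    List (List (List (String × String))) × List (List (String × String)) × Bool :=
  let isT := pvIsText seg
  if isT && st.2.2 then (st.1 ++ [st.2.1], [seg], isT)
  else (st.1, st.2.1 ++ [seg], isT)

def split_consecutive_texts_py (segments : List (List (String × String))) :
    List (List (List (String × String))) :=
  if segments = [] then []
  else
    let st := segments.foldl pvAStep ([], [], false)
    if st.2.1 = [] then st.1 else st.1 ++ [st.2.1]

-- ===== PORT B =====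
-- segments[i].get("command") == "text" and segments[i-1].get("command") == "text";
-- indexing ported with pyGetD (the indices produced by range(1, n) are always in range,
-- so Python's plain indexing never raises here)
def split_consecutive_texts_py_alt (segments : List (List (String × String))) :
    List (List (List (String × String))) :=
  if segments = [] then []
  else
    let n : Int := segments.length
    let cuts := (PySem.List.pyRange 1 n).filter (fun i =>
      pvIsText (PySem.List.pyGetD segments i []) &&
      pvIsText (PySem.List.pyGetD segments (i - 1) []))
    let bounds := [0] ++ cuts ++ [n]
    (PySem.List.pyRange 0 ((bounds.length : Int) - 1)).map (fun j =>
      PySem.List.slice segments (some (PySem.List.pyGetD bounds j 0))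
        (some (PySem.List.pyGetD bounds (j + 1) 0)))

-- ===== PRECONDITION & SPEC =====
def Spec_split_consecutive_texts_py (segments : List (List (String × String))) (out : List (List (List (String × String)))) : Prop := out = split_consecutive_texts_py_alt segments
instance (segments : List (List (String × String))) (out : List (List (List (String × String)))) : Decidable (Spec_split_consecutive_texts_py segments out) := by unfold Spec_split_consecutive_texts_py; infer_instance

-- ===== CLAIM (what is proved, stated in full; the proofs are below) =====
def Claim_equal_split_consecutive_texts_py : Prop := ∀ (segments : List (List (String × String))), Dom_split_consecutive_texts_py segments → Spec_split_consecutive_texts_py segments (split_consecutive_texts_py segments)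

-- ===== LEMMAS AND PROOFS =====

-- the slices between consecutive bounds
def pvPairSlices (s : List (List (String × String))) : List Int → List (List (List (String × String)))
  | a :: b :: rest =>
      PySem.List.slice s (some a) (some b) :: pvPairSlices s (b :: rest)
  | _ => []

-- the cut indices B collects (the inline filter of port B, named for the proofs)
def pvCuts (s : List (List (String × String))) : List Int :=
  (PySem.List.pyRange 1 (s.length : Int)).filter (fun i =>
    pvIsText (PySem.List.pyGetD s i []) &&
    pvIsText (PySem.List.pyGetD s (i - 1) []))

lemma pvGetD_last {α : Type} (l : List α) (d : α) :
    l.getD (l.length - 1) d = l.getLastD d := by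
  simp [List.getD, List.getLastD_eq_getLast?, List.getLast?_eq_getElem?]

lemma pvGetLastD_mem {α : Type} : ∀ (l : List α), l ≠ [] → ∀ d : α, l.getLastD d ∈ l := by
  intro l
  induction l with
  | nil => intro h; exact absurd rfl h
  | cons a t ih =>
    intro _ d
    cases t with
    | nil => simp
    | cons b u =>
      have hm := ih (by simp) a
      simp only [List.getLastD_cons] at hm ⊢
      exact List.mem_cons_of_mem a hm

lemma pvGetD_append_lt (s : List (List (String × String))) (y : List (String × String))
    (i : Int) (h0 : 0 ≤ i) (hlt : i < (s.length : Int)) (d : List (String × String)) :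
    PySem.List.pyGetD (s ++ [y]) i d = PySem.List.pyGetD s i d := by
  lift i to ℕ using h0
  rw [PySem.List.pyGetD_natCast, PySem.List.pyGetD_natCast]
  exact List.getD_append s [y] d i (by exact_mod_cast hlt)

lemma pvPairSlices_length (s : List (List (String × String))) :
    ∀ bs : List Int, (pvPairSlices s bs).length = bs.length - 1 := by
  intro bs
  induction bs with
  | nil => rfl
  | cons a t ih =>
    cases t with
    | nil => rfl
    | cons b u => simp only [pvPairSlices, List.length_cons] at *; omega

lemma pvPairSlices_getD (s : List (List (String × String))) :
    ∀ (bs : List Int) (j : Nat), j + 1 < bs.length →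
      (pvPairSlices s bs).getD j []
        = PySem.List.slice s (some (bs.getD j 0)) (some (bs.getD (j + 1) 0)) := by
  intro bs
  induction bs with
  | nil => intro j hj; simp at hj
  | cons a t ih =>
    intro j hj
    cases t with
    | nil => simp at hj
    | cons b u =>
      cases j with
      | zero => rfl
      | succ k =>
        simp only [pvPairSlices, List.getD_cons_succ]
        exact ih k (by simpa using hj)

-- de-indexing: B's map over range(len(bounds)-1) is the pair-slices of bounds
lemma pvMap_pyRange_pairSlices (s : List (List (String × String))) (bs : List Int) :
    (PySem.List.pyRange 0 ((bs.length : Int) - 1)).map (fun j =>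
      PySem.List.slice s (some (PySem.List.pyGetD bs j 0))
        (some (PySem.List.pyGetD bs (j + 1) 0))) = pvPairSlices s bs := by
  apply List.ext_getElem
  · rw [List.length_map, PySem.List.length_pyRange_one, pvPairSlices_length]; omega
  · intro j h1 h2
    rw [List.getElem_map, PySem.List.getElem_pyRange_one]
    rw [← List.getD_eq_getElem (pvPairSlices s bs) [] h2,
        pvPairSlices_getD s bs j (by rw [pvPairSlices_length] at h2; omega)]
    have e1 : (0 : Int) + (j : Nat) = ((j : Nat) : Int) := by omega
    have e2 : (0 : Int) + (j : Nat) + 1 = (((j + 1 : Nat)) : Int) := by push_cast; omega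
    rw [e2, e1, PySem.List.pyGetD_natCast, PySem.List.pyGetD_natCast]

lemma pvPairSlices_snoc (s : List (List (String × String))) (bs : List Int) (m : Int)
    (h : bs ≠ []) :
    pvPairSlices s (bs ++ [m])
      = pvPairSlices s bs ++ [PySem.List.slice s (some (bs.getLastD 0)) (some m)] := by
  induction bs with
  | nil => exact absurd rfl h
  | cons a t ih =>
    cases t with
    | nil => simp [pvPairSlices]
    | cons b u =>
      simp only [List.cons_append, pvPairSlices, List.getLastD_cons]
      rw [← List.cons_append, ih (by simp)]
      simp only [List.getLastD_cons]

lemma pvSlice_stable (s : List (List (String × String))) (y : List (String × String))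
    {a b : Int} (ha : 0 ≤ a) (hb : 0 ≤ b) (hbl : b ≤ (s.length : Int)) :
    PySem.List.slice (s ++ [y]) (some a) (some b) = PySem.List.slice s (some a) (some b) := by
  rw [PySem.List.slice_toNat _ ha hb, PySem.List.slice_toNat _ ha hb]
  by_cases ha' : a.toNat ≤ s.length
  · rw [List.drop_append_of_le_length ha',
        List.take_append_of_le_length (by rw [List.length_drop]; omega)]
  · have hz : b.toNat - a.toNat = 0 := by omega
    simp [hz]

lemma pvSlice_extend (s : List (List (String × String))) (y : List (String × String))
    {a : Int} (ha : 0 ≤ a) (hal : a ≤ (s.length : Int)) :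
    PySem.List.slice (s ++ [y]) (some a) (some ((s.length : Int) + 1))
      = PySem.List.slice s (some a) (some (s.length : Int)) ++ [y] := by
  rw [PySem.List.slice_toNat _ ha (by positivity), PySem.List.slice_toNat _ ha (Int.natCast_nonneg _)]
  have ha' : a.toNat ≤ s.length := by omega
  have hl : ((s.length : Int) + 1).toNat = s.length + 1 := by omega
  have hl2 : ((s.length : Int)).toNat = s.length := by omega
  rw [List.drop_append_of_le_length ha', hl, hl2,
      List.take_of_length_le (by simp [List.length_drop]; omega),
      List.take_of_length_le (by rw [List.length_drop])]

lemma pvPairSlices_stable (s : List (List (String × String))) (y : List (String × String)) :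
    ∀ bs : List Int, (∀ b ∈ bs, 0 ≤ b ∧ b ≤ (s.length : Int)) →
      pvPairSlices (s ++ [y]) bs = pvPairSlices s bs := by
  intro bs
  induction bs with
  | nil => intro _; rfl
  | cons a t ih =>
    intro h
    cases t with
    | nil => rfl
    | cons b u =>
      simp only [pvPairSlices]
      rw [pvSlice_stable s y (h a (by simp)).1 (h b (by simp)).1 (h b (by simp)).2,
          ih (fun x hx => h x (List.mem_cons_of_mem a hx))]

lemma pvCuts_mem (s : List (List (String × String))) (i : Int) (hi : i ∈ pvCuts s) :
    1 ≤ i ∧ i < (s.length : Int) := by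
  unfold pvCuts at hi
  exact PySem.List.mem_pyRange_one.mp (List.mem_filter.mp hi).1

-- B as pair-slices of its bounds
lemma pvB_eq (s : List (List (String × String))) (h : s ≠ []) :
    split_consecutive_texts_py_alt s
      = pvPairSlices s ([0] ++ pvCuts s ++ [(s.length : Int)]) := by
  simp only [split_consecutive_texts_py_alt, pvCuts, if_neg h]
  exact pvMap_pyRange_pairSlices s _

lemma pvCuts_snoc (s : List (List (String × String))) (y : List (String × String))
    (h : s ≠ []) :
    pvCuts (s ++ [y])
      = pvCuts s ++ (if pvIsText y && pvIsText (s.getLastD []) then [(s.length : Int)] else []) := by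
  have hlen : 1 ≤ s.length := List.length_pos_iff.mpr h
  unfold pvCuts
  have hl : ((s ++ [y]).length : Int) = (s.length : Int) + 1 := by simp
  rw [hl, PySem.List.pyRange_one_succ_right (by exact_mod_cast hlen), List.filter_append]
  congr 1
  · apply List.filter_congr
    intro i hi
    have hib := PySem.List.mem_pyRange_one.mp hi
    rw [pvGetD_append_lt s y i (by omega) (by omega),
        pvGetD_append_lt s y (i - 1) (by omega) (by omega)]
  · have e1 : PySem.List.pyGetD (s ++ [y]) ((s.length : Int)) [] = y := by
      rw [PySem.List.pyGetD_natCast]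
      simp [List.getD]
    have e2 : PySem.List.pyGetD (s ++ [y]) ((s.length : Int) - 1) [] = s.getLastD [] := by
      have ec : ((s.length : Int) - 1) = (((s.length - 1 : Nat)) : Int) := by omega
      rw [ec, PySem.List.pyGetD_natCast, List.getD_append s [y] [] _ (by omega), pvGetD_last]
    simp only [List.filter, e1, e2]
    cases pvIsText y <;> cases pvIsText (s.getLastD []) <;> simp

lemma pvAStep_cases (st : List (List (List (String × String))) × List (List (String × String)) × Bool)
    (seg : List (String × String)) :
    pvAStep st seg
      = if (pvIsText seg && st.2.2) = true then (st.1 ++ [st.2.1], [seg], pvIsText seg)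
        else (st.1, st.2.1 ++ [seg], pvIsText seg) := rfl

-- A's loop invariant after a nonempty prefix
lemma pvA_state (s : List (List (String × String))) (h : s ≠ []) :
    (s.foldl pvAStep ([], [], false)).2.1 ≠ [] ∧
    (s.foldl pvAStep ([], [], false)).2.2 = pvIsText (s.getLastD []) := by
  induction s using List.reverseRecOn with
  | nil => exact absurd rfl h
  | append_singleton t y ih =>
    rcases eq_or_ne t [] with ht | ht
    · subst ht; simp [pvAStep]
    · obtain ⟨h1, h2⟩ := ih ht
      rw [List.foldl_append]
      simp only [List.foldl_cons, List.foldl_nil]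
      rw [pvAStep_cases]
      constructor
      · split <;> simp
      · split <;> simp

lemma pvA_eq (s : List (List (String × String))) (h : s ≠ []) :
    split_consecutive_texts_py s
      = (s.foldl pvAStep ([], [], false)).1 ++ [(s.foldl pvAStep ([], [], false)).2.1] := by
  simp only [split_consecutive_texts_py]
  rw [if_neg h, if_neg (pvA_state s h).1]

lemma pvA_snoc (s : List (List (String × String))) (y : List (String × String)) (h : s ≠ []) :
    split_consecutive_texts_py (s ++ [y])
      = if pvIsText y && pvIsText (s.getLastD []) then
          split_consecutive_texts_py s ++ [[y]]
        else
          (split_consecutive_texts_py s).dropLast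
            ++ [(split_consecutive_texts_py s).getLastD [] ++ [y]] := by
  obtain ⟨h1, h2⟩ := pvA_state s h
  rw [pvA_eq (s ++ [y]) (by simp), pvA_eq s h, List.foldl_append]
  simp only [List.foldl_cons, List.foldl_nil]
  rw [pvAStep_cases, ← h2]
  by_cases hc : (pvIsText y && (s.foldl pvAStep ([], [], false)).2.2) = true
  · rw [if_pos hc, if_pos hc]
  · rw [if_neg hc, if_neg hc, List.dropLast_concat, List.getLastD_concat]

lemma pvB_snoc (s : List (List (String × String))) (y : List (String × String)) (h : s ≠ []) :
    split_consecutive_texts_py_alt (s ++ [y])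
      = if pvIsText y && pvIsText (s.getLastD []) then
          split_consecutive_texts_py_alt s ++ [[y]]
        else
          (split_consecutive_texts_py_alt s).dropLast
            ++ [(split_consecutive_texts_py_alt s).getLastD [] ++ [y]] := by
  have hlen : 1 ≤ s.length := List.length_pos_iff.mpr h
  have hl : ((s ++ [y]).length : Int) = (s.length : Int) + 1 := by simp
  have hbs0 : ([0] ++ pvCuts s : List Int) ≠ [] := by simp
  have hmem : ∀ b ∈ ([0] ++ pvCuts s : List Int), 0 ≤ b ∧ b ≤ (s.length : Int) := by
    intro b hb
    rcases List.mem_append.mp hb with hb | hb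
    · simp at hb; subst hb; exact ⟨le_refl 0, Int.natCast_nonneg _⟩
    · have := pvCuts_mem s b hb; omega
  have ha0 := hmem _ (pvGetLastD_mem _ hbs0 0)
  rw [pvB_eq (s ++ [y]) (by simp), pvB_eq s h, pvCuts_snoc s y h, hl]
  by_cases hc : (pvIsText y && pvIsText (s.getLastD [])) = true
  · simp only [hc, if_true]
    have eb : ([0] ++ (pvCuts s ++ [(s.length : Int)]) ++ [(s.length : Int) + 1] : List Int)
        = (([0] ++ pvCuts s ++ [(s.length : Int)]) ++ [(s.length : Int) + 1]) := by simp
    rw [eb, pvPairSlices_snoc _ _ _ (by simp), List.getLastD_concat,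
        pvPairSlices_stable s y _ (by
          intro b hb
          rcases List.mem_append.mp hb with hb | hb
          · have := hmem b hb; exact ⟨this.1, this.2⟩
          · simp at hb; subst hb; exact ⟨Int.natCast_nonneg _, le_refl _⟩),
        pvSlice_extend s y (Int.natCast_nonneg _) (le_refl _)]
    have hnil : PySem.List.slice s (some ((s.length : Int))) (some ((s.length : Int))) = ([] : List (List (String × String))) := by
      rw [PySem.List.slice_toNat _ (Int.natCast_nonneg _) (Int.natCast_nonneg _)]
      simp
    rw [hnil]
    simp
  · simp only [hc, if_false, Bool.false_eq_true]
    have eb : ([0] ++ (pvCuts s ++ []) ++ [(s.length : Int) + 1] : List Int)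
        = (([0] ++ pvCuts s) ++ [(s.length : Int) + 1]) := by simp
    rw [eb, pvPairSlices_snoc _ _ _ hbs0,
        pvPairSlices_stable s y _ hmem,
        pvSlice_extend s y ha0.1 ha0.2]
    have eb2 : ([0] ++ pvCuts s ++ [(s.length : Int)] : List Int)
        = (([0] ++ pvCuts s) ++ [(s.length : Int)]) := by simp
    rw [eb2, pvPairSlices_snoc _ _ _ hbs0, List.dropLast_concat, List.getLastD_concat]

lemma pvSingleton (y : List (String × String)) :
    split_consecutive_texts_py [y] = [[y]] ∧ split_consecutive_texts_py_alt [y] = [[y]] := by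
  constructor
  · simp [split_consecutive_texts_py, pvAStep]
  · have h1 : ([y] : List (List (String × String))) ≠ [] := by simp
    rw [pvB_eq [y] h1]
    have hc : pvCuts [y] = [] := by
      unfold pvCuts
      rw [PySem.List.pyRange_one_eq_nil (by simp)]
      rfl
    rw [hc, List.append_nil]
    simp only [pvPairSlices, List.singleton_append]
    rw [PySem.List.slice_toNat _ (by norm_num) (by positivity)]
    simp

lemma pvMain (segments : List (List (String × String))) :
    split_consecutive_texts_py segments = split_consecutive_texts_py_alt segments := by
  induction segments using List.reverseRecOn with
  | nil => rfl
  | append_singleton s y ih =>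
    rcases eq_or_ne s [] with hs | hs
    · subst hs
      exact ((pvSingleton y).1).trans ((pvSingleton y).2).symm
    · rw [pvA_snoc s y hs, pvB_snoc s y hs, ih]

-- ===== VERDICT (by name: the statement is the Claim_ definition above) =====
theorem split_consecutive_texts_py_spec : Claim_equal_split_consecutive_texts_py := by
  intro segments _
  exact pvMain segments
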